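-- pv_equiv track=rewrite | github.com/Legend-of-Dragoon-Modding/TLoD-Assets-Manager | gltf_handlers/gltf_compiler.py | generate_bufferview
-- ===== SOURCE A (Python) =====
-- def generate_bufferview(bv_current_size_array=int, bv_elements_sizes=list) -> dict:
--     """
--     Generate BufferView:\n
--     Generate BufferView Data for an glTF Array,\n
--     for that we previously calculate full size of it and each element size.
--     """
--     object_buffer_view: dict = {}
--
--     internal_offset = bv_current_size_array
--     accessor_number = 0
--     for bv_element in bv_elements_sizes:
--         current_target = 0
--         if (accessor_number == 5):
--             current_target = 34963
--         else:
--             current_target = 34962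
--
--         buffer = 0
--         byte_length = bv_element
--         byte_offset = internal_offset
--         target = current_target
--
--         this_buffer_view: dict = {f'BufferView_{accessor_number}':
--                                   {'buffer': buffer, 'byteLength': byte_length, 'byteOffset': byte_offset, 'target': target}}
--
--         object_buffer_view.update(this_buffer_view)
--
--         internal_offset += bv_element
--         accessor_number += 1
--
--     return object_buffer_view
-- ===== SOURCE B (Python) =====
-- def generate_bufferview(bv_current_size_array=int, bv_elements_sizes=list) -> dict:
--     # Stage 1: precompute the byteOffset table (running prefix sums).
--     offsets = []
--     running = bv_current_size_array
--     for size in bv_elements_sizes: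
--         offsets.append(running)
--         running += size
--     # Stage 2: assemble all BufferView entries in one comprehension.
--     return {f'BufferView_{i}': {'buffer': 0,
--                                 'byteLength': size,
--                                 'byteOffset': offset,
--                                 'target': 34963 if i == 5 else 34962}
--             for i, (offset, size) in enumerate(zip(offsets, bv_elements_sizes))}
-- ===== Notes on version B (the rewrite author's own statement) =====
-- stated objective: alternative
-- what changed: B precomputes the whole byteOffset table as a separate prefix-sum stage and then assembles the result dict in a single comprehension over enumerate(zip(offsets, sizes)), instead of A's one loop that mutates a running offset and counter while emitting entries.
import Mathlib
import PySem

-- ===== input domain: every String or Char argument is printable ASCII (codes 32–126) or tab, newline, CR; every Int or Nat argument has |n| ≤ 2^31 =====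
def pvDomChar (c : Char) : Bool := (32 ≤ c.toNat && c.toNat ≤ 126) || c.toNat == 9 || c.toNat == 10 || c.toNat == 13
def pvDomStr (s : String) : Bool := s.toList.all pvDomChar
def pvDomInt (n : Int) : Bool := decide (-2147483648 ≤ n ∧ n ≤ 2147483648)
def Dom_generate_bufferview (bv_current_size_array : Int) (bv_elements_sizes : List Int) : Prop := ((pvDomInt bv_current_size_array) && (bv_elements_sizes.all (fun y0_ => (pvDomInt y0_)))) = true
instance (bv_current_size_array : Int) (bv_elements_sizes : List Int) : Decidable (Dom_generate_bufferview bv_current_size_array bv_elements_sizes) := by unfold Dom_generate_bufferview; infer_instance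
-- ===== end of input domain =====

-- B replaces A's single emit loop (mutating a running offset and counter) by a separate
-- prefix-sum offsets stage followed by one comprehension over enumerate(zip(offsets, sizes));
-- objective: alternative decomposition, same cost.

-- ===== PORT A =====
-- A's loop: state = (dict, internal_offset, accessor_number)
def gbLoopA : List Int → PySem.Dict String (List (String × Int)) → Int → Int → PySem.Dict String (List (String × Int))
  | [], d, _, _ => d
  | e :: rest, d, off, n =>
      gbLoopA rest
        (d.insert ("BufferView_" ++ PySem.Int.toStr n)
          [("buffer", 0), ("byteLength", e), ("byteOffset", off),
           ("target", if n == 5 then (34963 : Int) else 34962)])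
        (off + e) (n + 1)

def generate_bufferview (bv_current_size_array : Int) (bv_elements_sizes : List Int) : List (String × List (String × Int)) :=
  (gbLoopA bv_elements_sizes PySem.Dict.empty bv_current_size_array 0).items

-- ===== PORT B =====
-- Stage 1 of Source B: the offsets loop, state = (offsets list, running)
def gbOffsets (sizes : List Int) (running : Int) : List Int × Int :=
  sizes.foldl (fun p s => (p.1 ++ [p.2], p.2 + s)) (([] : List Int), running)

-- Stage 2 of Source B: the dict comprehension over enumerate(zip(offsets, sizes))
def gbEmit (d : PySem.Dict String (List (String × Int))) (p : Int × (Int × Int)) : PySem.Dict String (List (String × Int)) :=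
  d.insert ("BufferView_" ++ PySem.Int.toStr p.1)
    [("buffer", 0), ("byteLength", p.2.2), ("byteOffset", p.2.1),
     ("target", if p.1 == 5 then (34963 : Int) else 34962)]

def generate_bufferview_alt (bv_current_size_array : Int) (bv_elements_sizes : List Int) : List (String × List (String × Int)) :=
  let offsets := (gbOffsets bv_elements_sizes bv_current_size_array).1
  ((PySem.List.enumerate (offsets.zip bv_elements_sizes) 0).foldl gbEmit PySem.Dict.empty).items

-- ===== PRECONDITION & SPEC =====
def Spec_generate_bufferview (bv_current_size_array : Int) (bv_elements_sizes : List Int) (out : List (String × List (String × Int))) : Prop := out = generate_bufferview_alt bv_current_size_array bv_elements_sizes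
instance (bv_current_size_array : Int) (bv_elements_sizes : List Int) (out : List (String × List (String × Int))) : Decidable (Spec_generate_bufferview bv_current_size_array bv_elements_sizes out) := by unfold Spec_generate_bufferview; infer_instance

-- ===== CLAIM (what is proved, stated in full; the proofs are below) =====
def Claim_equal_generate_bufferview : Prop := ∀ (bv_current_size_array : Int) (bv_elements_sizes : List Int), Dom_generate_bufferview bv_current_size_array bv_elements_sizes → Spec_generate_bufferview bv_current_size_array bv_elements_sizes (generate_bufferview bv_current_size_array bv_elements_sizes)

-- ===== LEMMAS AND PROOFS =====

-- the offsets accumulator only ever appends: its first component splits off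
theorem gbOffsets_fst_append (sizes : List Int) (out : List Int) (running : Int) :
    (sizes.foldl (fun p s => (p.1 ++ [p.2], p.2 + s)) (out, running)).1
      = out ++ (gbOffsets sizes running).1 := by
  induction sizes generalizing out running with
  | nil => simp [gbOffsets]
  | cons s rest ih =>
      simp only [gbOffsets, List.foldl_cons]
      rw [ih, ih ([] ++ [running])]
      simp

-- cons-shape of the offsets table
theorem gbOffsets_cons (s : Int) (rest : List Int) (running : Int) :
    (gbOffsets (s :: rest) running).1 = running :: (gbOffsets rest (running + s)).1 := by
  simp only [gbOffsets, List.foldl_cons]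
  rw [gbOffsets_fst_append]
  simp [gbOffsets]

-- A's loop performs exactly B's insert sequence
theorem gbLoopA_eq_foldl (sizes : List Int) (d : PySem.Dict String (List (String × Int))) (off n : Int) :
    gbLoopA sizes d off n
      = (PySem.List.enumerate (((gbOffsets sizes off).1).zip sizes) n).foldl gbEmit d := by
  induction sizes generalizing d off n with
  | nil => simp [gbLoopA, gbOffsets, PySem.List.enumerate_nil]
  | cons e rest ih =>
      rw [gbOffsets_cons]
      simp only [List.zip_cons_cons, PySem.List.enumerate_cons, List.foldl_cons, gbLoopA]
      rw [ih]
      rfl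

-- ===== VERDICT (by name: the statement is the Claim_ definition above) =====
theorem generate_bufferview_spec : Claim_equal_generate_bufferview := by
  intro cur sizes _
  unfold Spec_generate_bufferview generate_bufferview generate_bufferview_alt
  rw [gbLoopA_eq_foldl]
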